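-- pv_equiv track=rewrite | github.com/QuantumAI-Blockchain/qubitcoin-aether | src/qubitcoin/aether/nlp_pipeline.py | _find_nearest_pos
-- ===== SOURCE A (Python) =====
-- from typing import Any, Dict, List, Optional, Tuple
--
-- def _find_nearest_pos(tags: List[str], origin: int,
--                       prefixes: Tuple[str, ...]) -> int:
--     """Find the nearest token (before or after) matching *prefixes*."""
--     best = -1
--     best_dist = len(tags) + 1
--     for i, tag in enumerate(tags):
--         if i == origin:
--             continue
--         for p in prefixes:
--             if tag.startswith(p):
--                 dist = abs(i - origin)
--                 if dist < best_dist: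
--                     best = i
--                     best_dist = dist
--                 break
--     return best
-- ===== SOURCE B (Python) =====
-- def _find_nearest_pos(tags, origin, prefixes):
--     """Find the nearest token (before or after) matching *prefixes*.
--
--     Expands outward from origin: distances 1..len(tags), before-side first,
--     returning the first in-range index whose tag matches; -1 if none.
--     """
--     n = len(tags)
--     for d in range(1, n + 1):
--         for i in (origin - d, origin + d):
--             if 0 <= i < n and any(tags[i].startswith(p) for p in prefixes):
--                 return i
--     return -1
-- ===== Notes on version B (the rewrite author's own statement) =====
-- stated objective: faster
-- what changed: Instead of scanning every tag while tracking the minimum distance, B expands outward from origin (d = 1..len(tags)), testing origin-d before origin+d and returning the first in-range matching index, so it stops as soon as the nearest match is found.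
import Mathlib
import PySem

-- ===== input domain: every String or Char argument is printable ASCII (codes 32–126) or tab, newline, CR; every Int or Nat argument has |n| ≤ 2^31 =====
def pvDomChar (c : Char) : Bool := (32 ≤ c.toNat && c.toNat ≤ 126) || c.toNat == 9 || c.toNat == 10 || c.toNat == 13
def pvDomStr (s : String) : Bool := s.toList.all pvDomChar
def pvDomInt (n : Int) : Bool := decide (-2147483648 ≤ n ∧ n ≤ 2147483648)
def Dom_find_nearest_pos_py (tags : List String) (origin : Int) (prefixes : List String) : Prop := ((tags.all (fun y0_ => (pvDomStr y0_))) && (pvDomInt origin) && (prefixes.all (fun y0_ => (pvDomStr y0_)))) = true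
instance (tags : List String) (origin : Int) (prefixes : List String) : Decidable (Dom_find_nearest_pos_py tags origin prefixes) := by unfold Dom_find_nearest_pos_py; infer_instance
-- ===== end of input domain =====

-- B replaces A's full scan with an outward expansion from origin (before-side first); alternative decomposition, same worst-case cost.


-- ===== PORT A =====
-- loop body of A: state (best, best_dist), item (i, tag)
def pvStepA (origin : Int) (prefixes : List String) (s : Int × Int) (it : Int × String) : Int × Int :=
  if it.1 = origin then s
  else if prefixes.any (fun p => PySem.Str.startswith it.2 p) then
    let dist := |it.1 - origin|
    if dist < s.2 then (it.1, dist) else s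
  else s

-- Python: for i, tag in enumerate(tags): skip i == origin; if any prefix matches, keep i when dist < best_dist.
def find_nearest_pos_py (tags : List String) (origin : Int) (prefixes : List String) : Int :=
  ((PySem.List.enumerate tags 0).foldl (pvStepA origin prefixes)
    (-1, (tags.length : Int) + 1)).1

-- ===== PORT B =====
-- tags[i] matches some prefix and 0 <= i < n (the loop-body test of Source B)
def pvAltHit (tags : List String) (prefixes : List String) (i : Int) : Bool :=
  decide (0 ≤ i ∧ i < (tags.length : Int)) &&
    ((PySem.List.pyGet? tags i).elim false (fun t => prefixes.any (fun p => PySem.Str.startswith t p)))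

-- for d in range(1, n+1): try origin-d then origin+d
def pvAltGo (tags : List String) (prefixes : List String) (origin : Int) (d : Nat) : Int :=
  if _h : d ≤ tags.length then
    if pvAltHit tags prefixes (origin - d) then origin - d
    else if pvAltHit tags prefixes (origin + d) then origin + d
    else pvAltGo tags prefixes origin (d + 1)
  else -1
termination_by tags.length + 1 - d

def find_nearest_pos_py_alt (tags : List String) (origin : Int) (prefixes : List String) : Int :=
  pvAltGo tags prefixes origin 1

-- ===== PRECONDITION & SPEC =====
def Spec_find_nearest_pos_py (tags : List String) (origin : Int) (prefixes : List String) (out : Int) : Prop := out = find_nearest_pos_py_alt tags origin prefixes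
instance (tags : List String) (origin : Int) (prefixes : List String) (out : Int) : Decidable (Spec_find_nearest_pos_py tags origin prefixes out) := by unfold Spec_find_nearest_pos_py; infer_instance

-- ===== CLAIM (what is proved, stated in full; the proofs are below) =====
def Claim_equal_find_nearest_pos_py : Prop := ∀ (tags : List String) (origin : Int) (prefixes : List String), Dom_find_nearest_pos_py tags origin prefixes → Spec_find_nearest_pos_py tags origin prefixes (find_nearest_pos_py tags origin prefixes)

-- ===== LEMMAS AND PROOFS =====

-- a candidate index: in range, not origin, tag matches, and within A's distance bound len(tags)
def pvOk (tags : List String) (prefixes : List String) (origin i : Int) : Prop :=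
  pvAltHit tags prefixes i = true ∧ i ≠ origin ∧ |i - origin| ≤ (tags.length : Int)

-- the common characterisation both ports satisfy
def pvP (tags : List String) (prefixes : List String) (origin r : Int) : Prop :=
  (r = -1 ∧ ∀ i, ¬ pvOk tags prefixes origin i) ∨
  (pvOk tags prefixes origin r ∧ ∀ j, pvOk tags prefixes origin j →
     |r - origin| < |j - origin| ∨ (|r - origin| = |j - origin| ∧ r ≤ j))

lemma pvOk_bounds {tags prefixes : List String} {origin i : Int}
    (h : pvOk tags prefixes origin i) : 0 ≤ i ∧ i < (tags.length : Int) := by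
  have := h.1
  simp [pvAltHit] at this
  exact this.1

lemma pvP_unique {tags prefixes : List String} {origin r1 r2 : Int}
    (h1 : pvP tags prefixes origin r1) (h2 : pvP tags prefixes origin r2) : r1 = r2 := by
  rcases h1 with ⟨e1, n1⟩ | ⟨o1, m1⟩
  · rcases h2 with ⟨e2, _⟩ | ⟨o2, _⟩
    · rw [e1, e2]
    · exact absurd o2 (n1 r2)
  · rcases h2 with ⟨_, n2⟩ | ⟨o2, m2⟩
    · exact absurd o1 (n2 r1)
    · rcases m1 r2 o2 with h | ⟨he, hle⟩ <;> rcases m2 r1 o1 with h' | ⟨he', hle'⟩ <;> omega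

-- ---- B side ----

lemma pvAltGo_spec (tags prefixes : List String) (origin : Int) :
    ∀ (k d : Nat), tags.length + 1 - d ≤ k → 1 ≤ d →
      (∀ j, pvOk tags prefixes origin j → (d : Int) ≤ |j - origin|) →
      pvP tags prefixes origin (pvAltGo tags prefixes origin d) := by
  intro k
  induction k with
  | zero =>
    intro d hk hd hlow
    have hdn : ¬ d ≤ tags.length := by omega
    rw [pvAltGo, dif_neg hdn]
    left
    refine ⟨rfl, fun i hi => ?_⟩
    have h1 := hlow i hi
    have h2 := hi.2.2
    omega
  | succ k ih =>
    intro d hk hd hlow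
    by_cases hdn : d ≤ tags.length
    · rw [pvAltGo, dif_pos hdn]
      by_cases hm : pvAltHit tags prefixes (origin - d) = true
      · rw [if_pos hm]
        right
        have hok : pvOk tags prefixes origin (origin - d) := by
          refine ⟨hm, by omega, by rw [abs_sub_comm]; rw [abs_of_nonneg (by omega)]; omega⟩
        refine ⟨hok, fun j hj => ?_⟩
        have h1 := hlow j hj
        rcases abs_cases (origin - d - origin) with ⟨e1, _⟩ | ⟨e1, _⟩ <;>
          rcases abs_cases (j - origin) with ⟨e2, _⟩ | ⟨e2, _⟩ <;> omega
      · rw [if_neg hm]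
        by_cases hp : pvAltHit tags prefixes (origin + d) = true
        · rw [if_pos hp]
          right
          have hok : pvOk tags prefixes origin (origin + d) := by
            refine ⟨hp, by omega, by rw [abs_of_nonneg (by omega)]; omega⟩
          refine ⟨hok, fun j hj => ?_⟩
          have h1 := hlow j hj
          have hjd : |j - origin| = (d : Int) → j = origin + d := by
            intro he
            rcases abs_cases (j - origin) with ⟨e2, _⟩ | ⟨e2, _⟩
            · omega
            · exfalso; apply hm; have : j = origin - d := by omega
              rw [← this]; exact hj.1
          rcases abs_cases (origin + d - origin) with ⟨e1, _⟩ | ⟨e1, _⟩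
          · by_cases he : |j - origin| = (d : Int)
            · have := hjd he; omega
            · omega
          · omega
        · rw [if_neg hp]
          apply ih (d + 1) (by omega) (by omega)
          intro j hj
          have h1 := hlow j hj
          by_cases he : |j - origin| = (d : Int)
          · exfalso
            rcases abs_cases (j - origin) with ⟨e2, _⟩ | ⟨e2, _⟩
            · apply hp; have : j = origin + d := by omega
              rw [← this]; exact hj.1
            · apply hm; have : j = origin - d := by omega
              rw [← this]; exact hj.1
          · push_cast; omega
    · rw [pvAltGo, dif_neg hdn]
      left
      refine ⟨rfl, fun i hi => ?_⟩
      have h1 := hlow i hi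
      have h2 := hi.2.2
      omega

lemma pvP_alt (tags prefixes : List String) (origin : Int) :
    pvP tags prefixes origin (find_nearest_pos_py_alt tags origin prefixes) := by
  apply pvAltGo_spec tags prefixes origin (tags.length + 1) 1 (by omega) le_rfl
  intro j hj
  have h2 := hj.2.1
  rcases abs_cases (j - origin) with ⟨e, _⟩ | ⟨e, _⟩ <;> omega

-- ---- A side ----

-- invariant after A has processed indices < k
def pvInv (tags prefixes : List String) (origin : Int) (k : Nat) (b bd : Int) : Prop :=
  ((b = -1 ∧ bd = (tags.length : Int) + 1) ∨
    (0 ≤ b ∧ b < (k : Int) ∧ pvAltHit tags prefixes b = true ∧ b ≠ origin ∧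
      bd = |b - origin| ∧ bd ≤ (tags.length : Int))) ∧
  (∀ j : Int, 0 ≤ j → j < (k : Int) → j ≠ origin → pvAltHit tags prefixes j = true →
      bd < |j - origin| ∨ (bd = |j - origin| ∧ b ≤ j))

lemma pvA_fold (tags prefixes : List String) (origin : Int) :
    ∀ (xs : List String) (s : Nat) (b bd : Int),
      tags.drop s = xs → pvInv tags prefixes origin s b bd →
      pvInv tags prefixes origin tags.length
        ((PySem.List.enumerate xs s).foldl (pvStepA origin prefixes) (b, bd)).1
        ((PySem.List.enumerate xs s).foldl (pvStepA origin prefixes) (b, bd)).2 := by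
  intro xs
  induction xs with
  | nil =>
    intro s b bd hdrop hinv
    have hs : tags.length ≤ s := by
      by_contra h
      have h2 := List.drop_eq_nil_iff.mp hdrop
      omega
    have hs' : tags.length = s ∨ tags.length < s := by omega
    have hsk : (tags.length : Int) ≤ (s : Int) := by exact_mod_cast hs
    simp only [PySem.List.enumerate_nil, List.foldl_nil]
    constructor
    · rcases hinv.1 with h | h
      · exact Or.inl h
      · right
        refine ⟨h.1, ?_, h.2.2⟩
        have hb := h.2.2.1
        -- b < tags.length from pvAltHit's range check
        have hb2 : b < (tags.length : Int) := by
          simp [pvAltHit] at hb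
          exact hb.1.2
        exact hb2
    · intro j h0 hj hne hhit
      apply hinv.2 j h0 ?_ hne hhit
      have : j < (tags.length : Int) := by
        simp [pvAltHit] at hhit
        exact hhit.1.2
      omega
  | cons x xs ih =>
    intro s b bd hdrop hinv
    have hs : s < tags.length := by
      by_contra h
      have h2 : tags.drop s = [] := List.drop_eq_nil_iff.mpr (by omega)
      rw [h2] at hdrop; simp at hdrop
    have hx : tags[s]'hs = x := by
      have h0 : (tags.drop s)[0]'(by rw [hdrop]; simp) = x := by
        simp [hdrop]
      rw [List.getElem_drop] at h0
      simpa using h0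
    have hdrop' : tags.drop (s + 1) = xs := by
      rw [← List.tail_drop, hdrop]; rfl
    have hitS : pvAltHit tags prefixes ((s : Nat) : Int)
        = prefixes.any (fun p => PySem.Str.startswith x p) := by
      simp [pvAltHit, PySem.List.pyGet?_natCast, List.getElem?_eq_getElem hs, hx]
      intro h
      omega
    rw [PySem.List.enumerate_cons, List.foldl_cons]
    simp only [pvStepA]
    by_cases ho : ((s : Nat) : Int) = origin
    · rw [if_pos ho]
      apply ih (s + 1) b bd hdrop'
      constructor
      · rcases hinv.1 with h | h
        · exact Or.inl h
        · right; refine ⟨h.1, by push_cast; omega, h.2.2⟩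
      · intro j h0 hj hne hhit
        by_cases hjs : j = ((s : Nat) : Int)
        · exfalso; rw [hjs] at hne; exact hne ho
        · exact hinv.2 j h0 (by push_cast at hj ⊢; omega) hne hhit
    · rw [if_neg ho]
      by_cases hmatch : prefixes.any (fun p => PySem.Str.startswith x p) = true
      · rw [if_pos hmatch]
        by_cases hlt : |((s : Nat) : Int) - origin| < bd
        · rw [if_pos hlt]
          apply ih (s + 1) _ _ hdrop'
          constructor
          · right
            have hbd : bd ≤ (tags.length : Int) + 1 := by
              rcases hinv.1 with h | h
              · omega
              · omega
            refine ⟨by omega, by push_cast; omega, by rw [hitS]; exact hmatch, ho, rfl, by omega⟩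
          · intro j h0 hj hne hhit
            by_cases hjs : j = ((s : Nat) : Int)
            · right; rw [hjs]; exact ⟨rfl, le_rfl⟩
            · have hj' : j < (s : Int) := by push_cast at hj ⊢; omega
              rcases hinv.2 j h0 hj' hne hhit with h | ⟨he, _⟩
              · left; omega
              · left; omega
        · rw [if_neg hlt]
          apply ih (s + 1) b bd hdrop'
          constructor
          · rcases hinv.1 with h | h
            · exact Or.inl h
            · right; refine ⟨h.1, by push_cast; omega, h.2.2⟩
          · intro j h0 hj hne hhit
            by_cases hjs : j = ((s : Nat) : Int)
            · rw [hjs]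
              have hble : b ≤ ((s : Nat) : Int) := by
                rcases hinv.1 with h | h
                · rw [h.1]; omega
                · have := h.2.1; omega
              omega
            · exact hinv.2 j h0 (by push_cast at hj ⊢; omega) hne hhit
      · rw [if_neg hmatch]
        apply ih (s + 1) b bd hdrop'
        constructor
        · rcases hinv.1 with h | h
          · exact Or.inl h
          · right; refine ⟨h.1, by push_cast; omega, h.2.2⟩
        · intro j h0 hj hne hhit
          by_cases hjs : j = ((s : Nat) : Int)
          · exfalso; rw [hjs, hitS] at hhit; exact hmatch hhit
          · exact hinv.2 j h0 (by push_cast at hj ⊢; omega) hne hhit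

lemma pvP_A (tags prefixes : List String) (origin : Int) :
    pvP tags prefixes origin (find_nearest_pos_py tags origin prefixes) := by
  have h := pvA_fold tags prefixes origin tags 0 (-1) ((tags.length : Int) + 1)
    (by simp)
    (by
      constructor
      · exact Or.inl ⟨rfl, rfl⟩
      · intro j h0 hj _ _; omega)
  simp only [Nat.cast_zero] at h
  unfold find_nearest_pos_py
  set st := (PySem.List.enumerate tags 0).foldl (pvStepA origin prefixes)
    (-1, (tags.length : Int) + 1) with hst
  rcases h.1 with hc | hc
  · left
    refine ⟨hc.1, fun i hi => ?_⟩
    have hb := pvOk_bounds hi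
    rcases h.2 i hb.1 hb.2 hi.2.1 hi.1 with hlt | ⟨he, _⟩
    · have := hi.2.2; omega
    · have := hi.2.2; omega
  · right
    have hok : pvOk tags prefixes origin st.1 := ⟨hc.2.2.1, hc.2.2.2.1, by
      have := hc.2.2.2.2; omega⟩
    refine ⟨hok, fun j hj => ?_⟩
    have hb := pvOk_bounds hj
    have := h.2 j hb.1 hb.2 hj.2.1 hj.1
    have hbd := hc.2.2.2.2.1
    omega

-- ===== VERDICT (by name: the statement is the Claim_ definition above) =====
theorem find_nearest_pos_py_spec : Claim_equal_find_nearest_pos_py := by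
  intro tags origin prefixes _
  unfold Spec_find_nearest_pos_py
  exact pvP_unique (pvP_A tags prefixes origin) (pvP_alt tags prefixes origin)
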